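-- pv_equiv track=rewrite | github.com/birc-gsa/bwt-python | src/bwt.py | otable
-- ===== SOURCE A (Python) =====
-- def otable(z: list[int]) -> list[list[int]]:
--     """
--     Compute the O table for a mapped string.
--
--     >>> otable([1, 2, 0, 2, 3])
--     [[0, 0, 0, 1, 1, 1], [0, 1, 1, 1, 1, 1], [0, 0, 1, 1, 2, 2], [0, 0, 0, 0, 0, 1]]
--     """
--     sigma = max(z) + 1
--     otab = [
--         [0] * (len(z) + 1) for _ in range(sigma)
--     ]
--     for a in range(sigma):
--         for i, b in enumerate(z):
--             otab[a][i + 1] = otab[a][i] + (a == b)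
--     return otab
-- ===== SOURCE B (Python) =====
-- def otable(z: list[int]) -> list[list[int]]:
--     sigma = max(z) + 1
--     otab = [[0] for _ in range(sigma)]
--     counts = {}
--     for b in z:
--         counts[b] = counts.get(b, 0) + 1
--         for a, row in enumerate(otab):
--             row.append(counts.get(a, 0))
--     return otab
-- ===== Notes on version B (the rewrite author's own statement) =====
-- stated objective: alternative
-- what changed: A fills the table with sigma independent full scans of z computing each row's prefix sums via (a==b) tests; B makes a single left-to-right pass over z maintaining a running occurrence counter and emitting one new table column per position.
-- outside the precondition, e.g. on otable([]): A raises ValueError, B raises ValueError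
import Mathlib
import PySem

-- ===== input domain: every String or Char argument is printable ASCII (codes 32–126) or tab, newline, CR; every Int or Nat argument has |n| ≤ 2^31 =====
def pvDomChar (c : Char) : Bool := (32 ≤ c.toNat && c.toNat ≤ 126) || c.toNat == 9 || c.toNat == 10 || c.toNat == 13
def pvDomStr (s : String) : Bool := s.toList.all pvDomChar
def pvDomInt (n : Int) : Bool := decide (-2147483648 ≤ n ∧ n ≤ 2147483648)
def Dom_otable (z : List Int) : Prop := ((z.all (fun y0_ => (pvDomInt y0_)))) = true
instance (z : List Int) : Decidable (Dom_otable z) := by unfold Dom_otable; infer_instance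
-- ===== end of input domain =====

-- B replaces A's per-row full scans of z by one pass keeping a running counter dict; same values, same cost class.

-- ===== PORT A =====
-- inner loop 'for i, b: otab[a][i+1] = otab[a][i] + (a == b)' as the structural recursion carrying the cell just written
def pvRowA (a : Int) (prev : Int) : List Int → List Int
  | [] => []
  | b :: bs => let v := prev + (if a = b then 1 else 0); v :: pvRowA a v bs

def otable (z : List Int) : List (List Int) :=
  match PySem.List.max? z (fun y => y) with
  | none => []   -- Python's max([]) raises ValueError; excluded by Pre_otable
  | some m =>
    (PySem.List.pyRange 0 (m + 1) 1).map (fun a => 0 :: pvRowA a 0 z)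

-- ===== PORT B =====
def pvStepB (st : PySem.Dict Int Int × List (List Int)) (b : Int) :
    PySem.Dict Int Int × List (List Int) :=
  let counts := st.1.insert b (st.1.getD b 0 + 1)
  (counts, (PySem.List.enumerate st.2 0).map (fun p => p.2 ++ [counts.getD p.1 0]))

def otable_alt (z : List Int) : List (List Int) :=
  match PySem.List.max? z (fun y => y) with
  | none => []   -- max([]) raises in B too; excluded by Pre_otable
  | some m =>
    (z.foldl pvStepB
      (PySem.Dict.empty, (PySem.List.pyRange 0 (m + 1) 1).map (fun _ => [(0 : Int)]))).2

-- ===== PRECONDITION & SPEC =====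
-- Both Pythons raise ValueError (max of empty sequence) on z = []; Pre_ excludes exactly that.
def Pre_otable (z : List Int) : Prop := z ≠ []
instance (z : List Int) : Decidable (Pre_otable z) := by unfold Pre_otable; infer_instance
def pvWitness_otable : List Int := [1, 2, 0, 2, 3]

def Spec_otable (z : List Int) (out : List (List Int)) : Prop := out = otable_alt z
instance (z : List Int) (out : List (List Int)) : Decidable (Spec_otable z out) := by unfold Spec_otable; infer_instance

-- ===== CLAIM (what is proved, stated in full; the proofs are below) =====
def Claim_equal_otable : Prop := ∀ (z : List Int), Dom_otable z → Pre_otable z → Spec_otable z (otable z)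

-- ===== LEMMAS AND PROOFS =====

-- enumerating a list rewritten in place keeps the indices
theorem pv_enum_map_self {α β : Type} (l : List α) (s : Int)
    (F : Int × α → β) :
    PySem.List.enumerate ((PySem.List.enumerate l s).map F) s
      = (PySem.List.enumerate l s).map (fun p => (p.1, F p)) := by
  induction l generalizing s with
  | nil => simp [PySem.List.enumerate_nil]
  | cons x xs ih => simp [PySem.List.enumerate_cons, ih]

-- main invariant of B's single pass
theorem pv_foldB (zs : List Int) (c : PySem.Dict Int Int) (rows : List (List Int)) :
    (zs.foldl pvStepB (c, rows)).2
      = (PySem.List.enumerate rows 0).map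
          (fun p => p.2 ++ pvRowA p.1 (c.getD p.1 0) zs) := by
  induction zs generalizing c rows with
  | nil =>
    simp [pvRowA, PySem.List.map_snd_enumerate]
  | cons b bs ih =>
    simp only [List.foldl_cons]
    rw [show List.foldl pvStepB (pvStepB (c, rows) b) bs
        = List.foldl pvStepB
            (c.insert b (c.getD b 0 + 1),
             (PySem.List.enumerate rows 0).map
               (fun p => p.2 ++ [(c.insert b (c.getD b 0 + 1)).getD p.1 0])) bs from rfl]
    rw [ih, pv_enum_map_self]
    rw [List.map_map]
    refine List.map_congr_left (fun p _ => ?_)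
    simp only [Function.comp, pvRowA, PySem.Dict.getD_insert, List.append_assoc,
      List.singleton_append]
    by_cases h : p.1 = b <;> simp [h]

theorem pv_enum_map_pyRange (σ : Int) (f : Int → List Int) :
    PySem.List.enumerate ((PySem.List.pyRange 0 σ 1).map f) 0
      = (PySem.List.pyRange 0 σ 1).map (fun a => (a, f a)) := by
  apply List.ext_getElem
  · simp [PySem.List.length_enumerate]
  · intro k h1 h2
    have hk : k < (PySem.List.pyRange 0 σ 1).length := by
      simpa [PySem.List.length_enumerate] using h1
    simp [PySem.List.getElem_enumerate, PySem.List.getElem_pyRange_one]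

-- ===== VERDICT (by name: the statement is the Claim_ definition above) =====
theorem otable_spec : Claim_equal_otable := by
  intro z _ _
  unfold Spec_otable otable otable_alt
  cases hm : PySem.List.max? z (fun y => y) with
  | none => rfl
  | some m =>
    dsimp only
    rw [pv_foldB, pv_enum_map_pyRange]
    rw [List.map_map]
    refine (List.map_congr_left (fun a _ => ?_)).symm
    simp [Function.comp, PySem.Dict.getD_empty]
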